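-- pv_equiv track=rewrite | github.com/RoryPoonyth/COMP472-MiniChess | CODE/MiniChessSkeletonCode.py | calculate_heuristic_e0
-- ===== SOURCE A (Python) =====
-- def calculate_heuristic_e0(game_state):
--     """
--     Calculate the heuristic value e0 for the given game state.
--     e0 = (#wp + 3·#wB + 3·#wN + 9·#wQ + 999·wK) − (#bp + 3·#bB + 3·#bN + 9·#bQ + 999·bK)
--     """
--     white_pieces = {
--         'p': 0,
--         'B': 0,
--         'N': 0,
--         'Q': 0,
--         'K': 0
--     }
--     black_pieces = {
--         'p': 0,
--         'B': 0,
--         'N': 0,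
--         'Q': 0,
--         'K': 0
--     }
--
--     for row in game_state["board"]:
--         for piece in row:
--             if piece.startswith('w'):
--                 piece_type = piece[1]
--                 if piece_type in white_pieces:
--                     white_pieces[piece_type] += 1
--             elif piece.startswith('b'):
--                 piece_type = piece[1]
--                 if piece_type in black_pieces:
--                     black_pieces[piece_type] += 1
--
--     white_score = (
--         white_pieces['p'] +
--         3 * white_pieces['B'] +
--         3 * white_pieces['N'] +
--         9 * white_pieces['Q'] +
--         999 * white_pieces['K']
--     )
--     black_score = (
--         black_pieces['p'] +
--         3 * black_pieces['B'] +
--         3 * black_pieces['N'] +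
--         9 * black_pieces['Q'] +
--         999 * black_pieces['K']
--     )
--
--     return white_score - black_score
-- ===== SOURCE B (Python) =====
-- WEIGHTS = (('p', 1), ('B', 3), ('N', 3), ('Q', 9), ('K', 999))
--
--
-- def calculate_heuristic_e0(game_state):
--     board = game_state["board"]
--
--     def count(key):
--         return sum(cell[:2] == key for row in board for cell in row)
--
--     return sum(w * (count('w' + t) - count('b' + t)) for t, w in WEIGHTS)
-- ===== Notes on version B (the rewrite author's own statement) =====
-- stated objective: alternative
-- what changed: Instead of one pass over cells that classifies each piece into two count dictionaries, B loops over the five weighted piece types and for each makes dedicated counting passes over the board comparing the two-character prefix cell[:2] against the exact keys 'w'+type and 'b'+type, summing weight*(white count - black count).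
-- outside the precondition, e.g. on calculate_heuristic_e0({'board': [['w']]}): A raises IndexError, B returns 0; on calculate_heuristic_e0({'board': [['wQ', 'b']]}): A raises IndexError, B returns 9; on calculate_heuristic_e0({}): A raises KeyError, B raises KeyError
import Mathlib
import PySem

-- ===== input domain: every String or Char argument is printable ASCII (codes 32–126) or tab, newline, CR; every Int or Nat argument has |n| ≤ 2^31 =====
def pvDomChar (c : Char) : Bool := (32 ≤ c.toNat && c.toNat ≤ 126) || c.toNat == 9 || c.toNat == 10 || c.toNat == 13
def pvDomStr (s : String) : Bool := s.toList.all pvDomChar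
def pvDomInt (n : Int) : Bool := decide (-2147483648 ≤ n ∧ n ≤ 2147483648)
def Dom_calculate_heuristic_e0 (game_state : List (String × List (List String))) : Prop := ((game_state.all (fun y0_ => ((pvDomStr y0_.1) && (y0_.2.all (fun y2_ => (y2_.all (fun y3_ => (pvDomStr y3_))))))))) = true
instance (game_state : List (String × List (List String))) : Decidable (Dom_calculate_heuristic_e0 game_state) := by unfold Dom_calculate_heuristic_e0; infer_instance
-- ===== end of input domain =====

-- B replaces A's single classifying pass with two count dictionaries by staged counting
-- passes: for each of the five weighted piece types it counts the cells whose two-character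
-- prefix equals 'w'+type resp. 'b'+type and sums weight*(white-black) (alternative).

-- ===== PORT A =====
def pvInitW : PySem.Dict String Int :=
  ((((PySem.Dict.empty.insert "p" 0).insert "B" 0).insert "N" 0).insert "Q" 0).insert "K" 0
def pvInitB : PySem.Dict String Int :=
  ((((PySem.Dict.empty.insert "p" 0).insert "B" 0).insert "N" 0).insert "Q" 0).insert "K" 0

def pvScore (d : PySem.Dict String Int) : Int :=
  d.getD "p" 0 + 3 * d.getD "B" 0 + 3 * d.getD "N" 0 + 9 * d.getD "Q" 0 + 999 * d.getD "K" 0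

def pvStepA (pr : PySem.Dict String Int × PySem.Dict String Int) (piece : String) :
    PySem.Dict String Int × PySem.Dict String Int :=
  if PySem.Str.startswith piece "w" then
    match PySem.Str.pyGet? piece 1 with
    | none => pr    -- Python raises IndexError here; excluded by Pre_
    | some c =>
      let pt := String.ofList [c]
      if pr.1.contains pt then (pr.1.insert pt (pr.1.getD pt 0 + 1), pr.2) else pr
  else if PySem.Str.startswith piece "b" then
    match PySem.Str.pyGet? piece 1 with
    | none => pr    -- Python raises IndexError here; excluded by Pre_
    | some c =>
      let pt := String.ofList [c]
      if pr.2.contains pt then (pr.1, pr.2.insert pt (pr.2.getD pt 0 + 1)) else pr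
  else pr

def calculate_heuristic_e0 (game_state : List (String × List (List String))) : Int :=
  match game_state.find? (fun p => p.1 == "board") with
  | none => 0    -- Python raises KeyError here; excluded by Pre_
  | some (_, board) =>
    let fin := board.foldl (fun pr row => row.foldl pvStepA pr) (pvInitW, pvInitB)
    pvScore fin.1 - pvScore fin.2

-- ===== PORT B =====
def pvWeightsList : List (String × Int) := [("p", 1), ("B", 3), ("N", 3), ("Q", 9), ("K", 999)]

-- sum(cell[:2] == key for row in board for cell in row)
def pvCount (board : List (List String)) (key : String) : Int :=
  ((board.flatMap id).map
    (fun cell => if PySem.Str.slice cell none (some 2) == key then (1 : Int) else 0)).sum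

def calculate_heuristic_e0_alt (game_state : List (String × List (List String))) : Int :=
  match game_state.find? (fun p => p.1 == "board") with
  | none => 0    -- Python raises KeyError here; excluded by Pre_
  | some (_, board) =>
    (pvWeightsList.map
      (fun tw => tw.2 * (pvCount board ("w" ++ tw.1) - pvCount board ("b" ++ tw.1)))).sum

-- ===== PRECONDITION & SPEC =====
-- Pre_ excludes inputs where the Python A raises: a missing "board" key (KeyError) and any
-- board cell equal to "w" or "b", on which piece[1] raises IndexError.
def Pre_calculate_heuristic_e0 (game_state : List (String × List (List String))) : Prop :=
  (match game_state.find? (fun p => p.1 == "board") with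
   | none => false
   | some (_, board) => board.all (fun row => row.all (fun cell => !(cell == "w" || cell == "b")))) = true
instance (game_state : List (String × List (List String))) : Decidable (Pre_calculate_heuristic_e0 game_state) := by unfold Pre_calculate_heuristic_e0; infer_instance

def pvWitness_calculate_heuristic_e0 : (List (String × List (List String))) :=
  [("board", [["wp", "bK"], ["", "wQ"]])]

def Spec_calculate_heuristic_e0 (game_state : List (String × List (List String))) (out : Int) : Prop := out = calculate_heuristic_e0_alt game_state
instance (game_state : List (String × List (List String))) (out : Int) : Decidable (Spec_calculate_heuristic_e0 game_state out) := by unfold Spec_calculate_heuristic_e0; infer_instance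

-- ===== CLAIM (what is proved, stated in full; the proofs are below) =====
def Claim_equal_calculate_heuristic_e0 : Prop := ∀ (game_state : List (String × List (List String))), Dom_calculate_heuristic_e0 game_state → Pre_calculate_heuristic_e0 game_state → Spec_calculate_heuristic_e0 game_state (calculate_heuristic_e0 game_state)
-- ===== LEMMAS AND PROOFS =====
def pvKeys : List String := ["p", "B", "N", "Q", "K"]

-- piece-type weight as a plain function of the second character
def pvW (d : Char) : Int :=
  if d = 'p' then 1 else if d = 'B' then 3 else if d = 'N' then 3
  else if d = 'Q' then 9 else if d = 'K' then 999 else 0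

-- the per-cell contribution to A's final score difference
def pvContrib (cell : String) : Int :=
  match cell.toList with
  | c :: d :: _ => if c = 'w' then pvW d else if c = 'b' then -pvW d else 0
  | _ => 0

theorem pvEqStr (d : Char) (s : String) : (String.ofList [d] = s) ↔ [d] = s.toList := by
  constructor
  · intro h; have := congrArg String.toList h; simpa using this
  · intro h
    have : String.ofList [d] = String.ofList s.toList := congrArg _ h
    simpa using this

theorem pvBeqStr (s t : String) : (s == t) = (s.toList == t.toList) := by
  by_cases h : s = t
  · simp [h]
  · have h2 : s.toList ≠ t.toList := fun hh => h (by
      have : String.ofList s.toList = String.ofList t.toList := congrArg _ hh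
      simpa using this)
    simp [h, h2]

theorem pvMemKeys (d : Char) : (String.ofList [d] ∈ pvKeys) ↔ d ∈ (['p','B','N','Q','K'] : List Char) := by
  simp only [pvKeys, List.mem_cons, List.not_mem_nil, or_false, pvEqStr]
  simp [show "p".toList = ['p'] from rfl, show "B".toList = ['B'] from rfl,
        show "N".toList = ['N'] from rfl, show "Q".toList = ['Q'] from rfl,
        show "K".toList = ['K'] from rfl]

theorem pvStarts (cell : String) (c : Char) (cs : List Char) (h : cell.toList = c :: cs) (w : Char) :
    PySem.Str.startswith cell (String.ofList [w]) = (c == w) := by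
  simp [PySem.Str.startswith_eq, h, PySem.Chars.startswith, List.isPrefixOf, eq_comm]

theorem pvStartsNil (cell : String) (h : cell.toList = []) (p : String) (hp : p ≠ "") :
    PySem.Str.startswith cell p = false := by
  have : p.toList ≠ [] := fun hh => hp (by
    have : String.ofList p.toList = String.ofList [] := congrArg _ hh
    simpa using this)
  cases hpl : p.toList with
  | nil => exact absurd hpl this
  | cons a as => simp [PySem.Str.startswith_eq, h, PySem.Chars.startswith, hpl]

theorem pvStepA_lemma (wd bd : PySem.Dict String Int)
    (hw : wd.keys = pvKeys) (hb : bd.keys = pvKeys) (cell : String) :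
    (pvStepA (wd, bd) cell).1.keys = pvKeys ∧ (pvStepA (wd, bd) cell).2.keys = pvKeys ∧
    pvScore (pvStepA (wd, bd) cell).1 - pvScore (pvStepA (wd, bd) cell).2
      = pvScore wd - pvScore bd + pvContrib cell := by
  rcases hl : cell.toList with _ | ⟨c, cs⟩
  · have h1 := pvStartsNil cell hl "w" (by decide)
    have h2 := pvStartsNil cell hl "b" (by decide)
    simp [pvStepA, pvContrib, hl, hw, hb, PySem.Chars.startswith]
  · have h1 : PySem.Str.startswith cell "w" = (c == 'w') := pvStarts cell c cs hl 'w'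
    have h2 : PySem.Str.startswith cell "b" = (c == 'b') := pvStarts cell c cs hl 'b'
    rcases cs with _ | ⟨d, ds⟩
    · -- one-char cell: piece[1] is none in the port, no contribution
      have hg : PySem.Str.pyGet? cell 1 = none := by simp [hl, PySem.List.pyGet?, PySem.List.pyIdx?]
      simp only [pvStepA, h1, h2, hg, pvContrib, hl]
      by_cases hc : c = 'w' <;> by_cases hcb : c = 'b' <;> simp_all
    · have hg1 : PySem.Str.pyGet? cell 1 = some d := by simp [hl, PySem.List.pyGet?, PySem.List.pyIdx?]
      have hcon : pvContrib cell = (if c = 'w' then pvW d else if c = 'b' then -pvW d else 0) := by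
        simp [pvContrib, hl]
      by_cases hc : c = 'w'
      · subst hc
        simp only [pvStepA, h1, hg1, beq_self_eq_true, if_true, hcon]
        have hcont : wd.contains (String.ofList [d]) = decide (d ∈ (['p','B','N','Q','K'] : List Char)) := by
          rw [PySem.Dict.contains_eq_decide_mem_keys, hw]
          simp [pvMemKeys]
        by_cases hd : d ∈ (['p','B','N','Q','K'] : List Char)
        · fin_cases hd <;>
          · simp only [hcont, show String.ofList ['p'] = "p" from rfl,
              show String.ofList ['B'] = "B" from rfl, show String.ofList ['N'] = "N" from rfl,
              show String.ofList ['Q'] = "Q" from rfl, show String.ofList ['K'] = "K" from rfl]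
            rw [if_pos (by decide)]
            refine ⟨?_, hb, ?_⟩
            · show (PySem.Dict.insert wd _ _).keys = pvKeys
              rw [PySem.Dict.keys_insert_of_contains wd _
                (by rw [PySem.Dict.contains_eq_decide_mem_keys, hw]; decide)]
              exact hw
            · simp [pvScore, PySem.Dict.getD_insert, pvW]
              ring
        · have hcf : wd.contains (String.ofList [d]) = false := by rw [hcont]; simpa using hd
          simp only [hcf, Bool.false_eq_true, if_false]
          refine ⟨hw, hb, ?_⟩
          simp only [List.mem_cons, List.not_mem_nil, or_false, not_or] at hd
          obtain ⟨n1, n2, n3, n4, n5⟩ := hd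
          simp [pvW, n1, n2, n3, n4, n5]
      · by_cases hcb : c = 'b'
        · subst hcb
          simp only [pvStepA, h1, h2, hg1, beq_self_eq_true, if_true,
            show (('b' : Char) == 'w') = false from rfl, Bool.false_eq_true, if_false, hcon]
          have hcont : bd.contains (String.ofList [d]) = decide (d ∈ (['p','B','N','Q','K'] : List Char)) := by
            rw [PySem.Dict.contains_eq_decide_mem_keys, hb]
            simp [pvMemKeys]
          by_cases hd : d ∈ (['p','B','N','Q','K'] : List Char)
          · fin_cases hd <;>
            · simp only [hcont, show String.ofList ['p'] = "p" from rfl,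
                show String.ofList ['B'] = "B" from rfl, show String.ofList ['N'] = "N" from rfl,
                show String.ofList ['Q'] = "Q" from rfl, show String.ofList ['K'] = "K" from rfl]
              rw [if_pos (by decide)]
              refine ⟨hw, ?_, ?_⟩
              · show (PySem.Dict.insert bd _ _).keys = pvKeys
                rw [PySem.Dict.keys_insert_of_contains bd _
                  (by rw [PySem.Dict.contains_eq_decide_mem_keys, hb]; decide)]
                exact hb
              · simp [pvScore, PySem.Dict.getD_insert, pvW]
                ring
          · have hcf : bd.contains (String.ofList [d]) = false := by rw [hcont]; simpa using hd
            simp only [hcf, Bool.false_eq_true, if_false]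
            refine ⟨hw, hb, ?_⟩
            simp only [List.mem_cons, List.not_mem_nil, or_false, not_or] at hd
            obtain ⟨n1, n2, n3, n4, n5⟩ := hd
            simp [pvW, n1, n2, n3, n4, n5]
        · have hb1 : (c == 'w') = false := by simp [hc]
          have hb2 : (c == 'b') = false := by simp [hcb]
          have h1' : PySem.Chars.startswith cell.toList ['w'] = (c == 'w') := by simpa using h1
          have h2' : PySem.Chars.startswith cell.toList ['b'] = (c == 'b') := by simpa using h2
          simp [pvStepA, h1', h2', hb1, hb2, hw, hb, hcon, hc, hcb]

theorem pvFoldl_lemma (cells : List String) (wd bd : PySem.Dict String Int)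
    (hw : wd.keys = pvKeys) (hb : bd.keys = pvKeys) :
    (cells.foldl pvStepA (wd, bd)).1.keys = pvKeys ∧
    (cells.foldl pvStepA (wd, bd)).2.keys = pvKeys ∧
    pvScore (cells.foldl pvStepA (wd, bd)).1 - pvScore (cells.foldl pvStepA (wd, bd)).2
      = pvScore wd - pvScore bd + (cells.map pvContrib).sum := by
  induction cells generalizing wd bd with
  | nil => simp [hw, hb]
  | cons c cs ih =>
    obtain ⟨h1, h2, h3⟩ := pvStepA_lemma wd bd hw hb c
    obtain ⟨g1, g2, g4⟩ := ih (pvStepA (wd, bd) c).1 (pvStepA (wd, bd) c).2 h1 h2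
    refine ⟨by simpa using g1, by simpa using g2, ?_⟩
    simp only [List.foldl_cons, List.map_cons, List.sum_cons]
    rw [show pvStepA (wd, bd) c = ((pvStepA (wd, bd) c).1, (pvStepA (wd, bd) c).2) from rfl] at *
    rw [g4, h3]
    ring

-- cell[:2] on the char-list level
theorem pvSlice2 (cell : String) :
    (PySem.Str.slice cell none (some 2)).toList = cell.toList.take 2 := by
  simp [PySem.Str.toList_slice, PySem.List.slice_to]

-- the decomposition of the per-cell contribution over the five weighted types
theorem pvCell_eq (cell : String) (h : cell.toList ≠ ['w'] ∧ cell.toList ≠ ['b']) :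
    (pvWeightsList.map (fun tw => tw.2 *
        ((if PySem.Str.slice cell none (some 2) == "w" ++ tw.1 then (1:Int) else 0)
        - (if PySem.Str.slice cell none (some 2) == "b" ++ tw.1 then (1:Int) else 0)))).sum
      = pvContrib cell := by
  have hs : ∀ k : String, (PySem.Str.slice cell none (some 2) == k) = (cell.toList.take 2 == k.toList) := by
    intro k; rw [pvBeqStr, pvSlice2]
  rcases hl : cell.toList with _ | ⟨c, cs⟩
  · simp [pvWeightsList, pvContrib, hs, hl]
  · rcases cs with _ | ⟨d, ds⟩
    · rw [hl] at h
      by_cases hc : c = 'w' <;> by_cases hcb : c = 'b' <;>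
        simp_all [pvWeightsList, pvContrib]
    · have ht : cell.toList.take 2 = [c, d] := by rw [hl]; rfl
      have hcon : pvContrib cell = (if c = 'w' then pvW d else if c = 'b' then -pvW d else 0) := by
        simp [pvContrib, hl]
      simp only [hs, ht, hcon]
      by_cases hc : c = 'w' <;> by_cases hcb : c = 'b' <;>
      by_cases h1 : d = 'p' <;> by_cases h2 : d = 'B' <;> by_cases h3 : d = 'N' <;>
      by_cases h4 : d = 'Q' <;> by_cases h5 : d = 'K' <;>
        simp_all [pvWeightsList, pvW]

theorem pvSumAdd {α : Type} (l : List α) (f g : α → Int) :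
    (l.map (fun x => f x + g x)).sum = (l.map f).sum + (l.map g).sum := by
  induction l with
  | nil => simp
  | cons a as ih => simp only [List.map_cons, List.sum_cons, ih]; ring

-- swap a double list sum
theorem pvSumSwap {α β : Type} (xs : List α) (ys : List β) (f : α → β → Int) :
    (xs.map (fun x => (ys.map (f x)).sum)).sum = (ys.map (fun y => (xs.map (fun x => f x y)).sum)).sum := by
  induction xs with
  | nil => simp
  | cons a as ih =>
    simp only [List.map_cons, List.sum_cons, ih, pvSumAdd]

theorem pvSumMulSub {α : Type} (l : List α) (w : Int) (f g : α → Int) :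
    (l.map (fun x => w * (f x - g x))).sum = w * ((l.map f).sum - (l.map g).sum) := by
  induction l with
  | nil => simp
  | cons a as ih => simp only [List.map_cons, List.sum_cons, ih]; ring

-- ===== VERDICT (by name: the statement is the Claim_ definition above) =====
theorem calculate_heuristic_e0_spec : Claim_equal_calculate_heuristic_e0 := by
  intro gs _ hp
  unfold Spec_calculate_heuristic_e0 calculate_heuristic_e0 calculate_heuristic_e0_alt
  unfold Pre_calculate_heuristic_e0 at hp
  cases hf : gs.find? (fun p => p.1 == "board") with
  | none => rfl
  | some kv =>
    rw [hf] at hp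
    obtain ⟨k, board⟩ := kv
    have hne : ∀ cell ∈ board.flatten, cell.toList ≠ ['w'] ∧ cell.toList ≠ ['b'] := by
      intro cell hc
      simp only [List.mem_flatten] at hc
      obtain ⟨row, hr, hcell⟩ := hc
      simp only [List.all_eq_true, Bool.not_eq_eq_eq_not, Bool.not_true, Bool.or_eq_false_iff,
        beq_eq_false_iff_ne, ne_eq] at hp
      obtain ⟨hw, hb⟩ := hp row hr cell hcell
      constructor
      · intro hh; exact hw (by have : String.ofList cell.toList = String.ofList ['w'] := congrArg _ hh; simpa using this)
      · intro hh; exact hb (by have : String.ofList cell.toList = String.ofList ['b'] := congrArg _ hh; simpa using this)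
    have h := pvFoldl_lemma (board.flatMap id) pvInitW pvInitB (by decide) (by decide)
    rw [List.flatMap_id] at h
    rw [List.foldl_flatten] at h
    simp only []
    rw [h.2.2]
    have hstart : pvScore pvInitW - pvScore pvInitB = 0 := by decide
    rw [hstart, zero_add]
    have hcongr : board.flatten.map pvContrib
        = board.flatten.map (fun cell => (pvWeightsList.map (fun tw => tw.2 *
            ((if PySem.Str.slice cell none (some 2) == "w" ++ tw.1 then (1:Int) else 0)
            - (if PySem.Str.slice cell none (some 2) == "b" ++ tw.1 then (1:Int) else 0)))).sum) := by
      apply List.map_congr_left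
      intro cell hc
      exact (pvCell_eq cell (hne cell hc)).symm
    rw [hcongr, pvSumSwap]
    apply congrArg
    apply List.map_congr_left
    intro tw _
    rw [pvSumMulSub]
    simp [pvCount, List.flatMap_id]
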